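-- pv_equiv track=rewrite | github.com/wolfdancer/advent.code | 2025/test_day6_2_example.py | parse_numbers_by_column
-- ===== SOURCE A (Python) =====
-- def parse_numbers_by_column(lines, operator_line_index):
--     """
--     Parse numbers into columns, reading right-to-left.
--     Returns a list of columns, where each column is a list of numbers from top to bottom.
--     """
--     # Split each line into tokens
--     rows = []
--     for i in range(operator_line_index):
--         tokens = lines[i].split()
--         rows.append(tokens)
--
--     # Find the maximum number of columns
--     max_cols = max(len(row) for row in rows)
--
--     # Build columns from right to left
--     columns = []
--     for col_idx in range(max_cols - 1, -1, -1):  # Right to left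
--         column = []
--         for row in rows:
--             if col_idx < len(row):
--                 column.append(int(row[col_idx]))
--         columns.append(column)
--
--     return columns
-- ===== SOURCE B (Python) =====
-- def parse_numbers_by_column(lines, operator_line_index):
--     """
--     Parse numbers into columns, reading right-to-left.
--     Single row-major pass: merge each row's tokens into the growing column
--     list (left-to-right), then reverse once at the end.
--     """
--     columns = []
--     for i in range(operator_line_index):
--         tokens = lines[i].split()
--         merged = []
--         rest = columns
--         for token in tokens:
--             head = rest[0] if rest else []
--             merged.append(head + [int(token)])
--             rest = rest[1:]
--         columns = merged + rest
--     return columns[::-1]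
-- ===== Notes on version B (the rewrite author's own statement) =====
-- stated objective: alternative
-- what changed: Replaces the column-major nested loop (for each column index, rescan all rows) by a single row-major pass that merges each row's tokens into a growing list of columns, reversed once at the end.
-- crash fix: On operator_line_index <= 0 A raises ValueError (max() of an empty sequence) while B returns []. — e.g. on parse_numbers_by_column([], 0): A raises ValueError, B returns []
import Mathlib
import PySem

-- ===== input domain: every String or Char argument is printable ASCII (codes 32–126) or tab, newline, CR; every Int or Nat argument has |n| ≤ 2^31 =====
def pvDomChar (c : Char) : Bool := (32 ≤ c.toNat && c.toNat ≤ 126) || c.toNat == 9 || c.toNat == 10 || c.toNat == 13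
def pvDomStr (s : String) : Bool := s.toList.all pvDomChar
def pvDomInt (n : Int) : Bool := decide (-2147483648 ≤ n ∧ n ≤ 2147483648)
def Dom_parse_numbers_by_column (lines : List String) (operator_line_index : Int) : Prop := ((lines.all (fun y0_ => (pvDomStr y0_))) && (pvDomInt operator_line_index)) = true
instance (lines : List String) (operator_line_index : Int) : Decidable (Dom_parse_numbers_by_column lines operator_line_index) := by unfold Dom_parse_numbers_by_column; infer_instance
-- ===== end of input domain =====

-- B replaces A's column-major nested loop by a single row-major merge pass, reversed once at the end.

-- int(token); Pre_ guarantees ofStr? is some, so the default is never used inside Pre_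
def pvVal (s : String) : Int := (PySem.Int.ofStr? s).getD 0

-- ===== PORT A =====
def parse_numbers_by_column (lines : List String) (operator_line_index : Int) : List (List Int) :=
  -- rows.append(lines[i].split()) for i in range(operator_line_index)
  let rows : List (List String) :=
    (PySem.List.pyRange 0 operator_line_index 1).foldl
      (fun rows i => rows ++ [PySem.Str.split₀ ((PySem.List.pyGet? lines i).getD "")]) []
  -- max_cols = max(len(row) for row in rows); ValueError on empty rows is excluded by Pre_
  let max_cols : Int :=
    (PySem.List.max? (rows.map (fun row => (row.length : Int))) (fun y => y)).getD 0
  -- for col_idx in range(max_cols - 1, -1, -1): scan all rows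
  (PySem.List.pyRange (max_cols - 1) (-1) (-1)).foldl
    (fun columns col_idx =>
      columns ++ [rows.foldl
        (fun column row =>
          if col_idx < (row.length : Int) then
            column ++ [pvVal ((PySem.List.pyGet? row col_idx).getD "")]
          else column) []]) []

-- ===== PORT B =====
def parse_numbers_by_column_alt (lines : List String) (operator_line_index : Int) : List (List Int) :=
  ((PySem.List.pyRange 0 operator_line_index 1).foldl
    (fun columns i =>
      let tokens := PySem.Str.split₀ ((PySem.List.pyGet? lines i).getD "")
      -- inner loop state: (merged, rest); rest[0]/rest[1:] ported as headD/tail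
      let mr := tokens.foldl
        (fun (st : List (List Int) × List (List Int)) t =>
          (st.1 ++ [st.2.headD [] ++ [pvVal t]], st.2.tail)) ([], columns)
      mr.1 ++ mr.2) []).reverse

-- ===== PRECONDITION & SPEC =====
-- Pre_ excludes exactly the inputs where Python A raises: operator_line_index ≤ 0 (ValueError from
-- max() of an empty sequence), an index beyond lines (IndexError), or a token int() rejects (ValueError).
def Pre_parse_numbers_by_column (lines : List String) (operator_line_index : Int) : Prop :=
  0 < operator_line_index ∧ operator_line_index ≤ lines.length ∧
  ∀ s ∈ lines.take operator_line_index.toNat, ∀ t ∈ PySem.Str.split₀ s,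
    PySem.Int.ofStr? t ≠ none

instance (lines : List String) (operator_line_index : Int) : Decidable (Pre_parse_numbers_by_column lines operator_line_index) := by
  unfold Pre_parse_numbers_by_column; infer_instance

def pvWitness_parse_numbers_by_column : List String × Int := (["1 2", "3"], 2)

-- On operator_line_index ≤ 0 A raises ValueError (max() of an empty sequence) while B returns [].
def Raises_parse_numbers_by_column (lines : List String) (operator_line_index : Int) : Prop :=
  operator_line_index ≤ 0

instance (lines : List String) (operator_line_index : Int) : Decidable (Raises_parse_numbers_by_column lines operator_line_index) := by
  unfold Raises_parse_numbers_by_column; infer_instance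

def pvRaiseWitness_parse_numbers_by_column : List String × Int := ([], 0)
def pvRaiseWitnessOut_parse_numbers_by_column : List (List Int) := []

def Spec_parse_numbers_by_column (lines : List String) (operator_line_index : Int) (out : List (List Int)) : Prop := out = parse_numbers_by_column_alt lines operator_line_index
instance (lines : List String) (operator_line_index : Int) (out : List (List Int)) : Decidable (Spec_parse_numbers_by_column lines operator_line_index out) := by unfold Spec_parse_numbers_by_column; infer_instance

-- ===== CLAIM (what is proved, stated in full; the proofs are below) =====
def Claim_equal_parse_numbers_by_column : Prop := ∀ (lines : List String) (operator_line_index : Int), Dom_parse_numbers_by_column lines operator_line_index → Pre_parse_numbers_by_column lines operator_line_index → Spec_parse_numbers_by_column lines operator_line_index (parse_numbers_by_column lines operator_line_index)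

def Claim_raises_parse_numbers_by_column : Prop := (∀ (lines : List String) (operator_line_index : Int), Dom_parse_numbers_by_column lines operator_line_index → Raises_parse_numbers_by_column lines operator_line_index → ¬ Pre_parse_numbers_by_column lines operator_line_index) ∧ (Dom_parse_numbers_by_column (pvRaiseWitness_parse_numbers_by_column.1) (pvRaiseWitness_parse_numbers_by_column.2) ∧ Raises_parse_numbers_by_column (pvRaiseWitness_parse_numbers_by_column.1) (pvRaiseWitness_parse_numbers_by_column.2) ∧ parse_numbers_by_column_alt (pvRaiseWitness_parse_numbers_by_column.1) (pvRaiseWitness_parse_numbers_by_column.2) = pvRaiseWitnessOut_parse_numbers_by_column)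

-- ===== LEMMAS AND PROOFS =====

-- the column at (0-based) index j, top to bottom, for a list of token rows
def pvColN (rows : List (List String)) (j : Nat) : List Int :=
  rows.filterMap (fun row => (row[j]?).map pvVal)

-- maximum row length
def pvMaxLen (rows : List (List String)) : Nat :=
  rows.foldr (fun r m => max r.length m) 0

-- recursive description of B's inner merge loop
def pvMergeCol (cols : List (List Int)) (toks : List String) : List (List Int) :=
  match cols, toks with
  | cols, [] => cols
  | [], t :: ts => [pvVal t] :: pvMergeCol [] ts
  | c :: cs, t :: ts => (c ++ [pvVal t]) :: pvMergeCol cs ts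

theorem pvColN_nil (j : Nat) : pvColN [] j = [] := rfl

theorem pvColN_cons (r : List String) (rs : List (List String)) (j : Nat) :
    pvColN (r :: rs) j = ((r[j]?).map pvVal).toList ++ pvColN rs j := by
  simp only [pvColN, List.filterMap_cons]
  cases r[j]? <;> simp

theorem pvMergeCol_length (toks : List String) (cols : List (List Int)) :
    (pvMergeCol cols toks).length = max cols.length toks.length := by
  induction toks generalizing cols with
  | nil => simp [pvMergeCol]
  | cons t ts ih =>
    cases cols with
    | nil => simp [pvMergeCol, ih]
    | cons c cs => simp [pvMergeCol, ih]

theorem pvMergeCol_getD (toks : List String) (cols : List (List Int)) (j : Nat) :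
    (pvMergeCol cols toks).getD j [] = cols.getD j [] ++ ((toks[j]?).map pvVal).toList := by
  induction toks generalizing cols j with
  | nil => cases cols <;> simp [pvMergeCol]
  | cons t ts ih =>
    cases cols with
    | nil =>
      cases j with
      | zero => simp [pvMergeCol]
      | succ j => simpa [pvMergeCol] using ih [] j
    | cons c cs =>
      cases j with
      | zero => simp [pvMergeCol]
      | succ j => simpa [pvMergeCol] using ih cs j

-- B's inner fold is pvMergeCol
theorem pvFold_eq_merge (toks : List String) (m rest : List (List Int)) :
    (toks.foldl
      (fun (st : List (List Int) × List (List Int)) t =>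
        (st.1 ++ [st.2.headD [] ++ [pvVal t]], st.2.tail)) (m, rest)).1 ++
    (toks.foldl
      (fun (st : List (List Int) × List (List Int)) t =>
        (st.1 ++ [st.2.headD [] ++ [pvVal t]], st.2.tail)) (m, rest)).2
      = m ++ pvMergeCol rest toks := by
  induction toks generalizing m rest with
  | nil => simp [pvMergeCol]
  | cons t ts ih =>
    cases rest with
    | nil => simpa [pvMergeCol] using ih (m ++ [[pvVal t]]) []
    | cons c cs => simpa [pvMergeCol] using ih (m ++ [c ++ [pvVal t]]) cs

theorem pvRangeMap_getD {α : Type} [Inhabited α] (l : List α) (d : α) :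
    (List.range l.length).map (fun j => l.getD j d) = l := by
  apply List.ext_getElem
  · simp
  · intro i h1 h2
    simp [List.getD_eq_getElem?_getD, List.getElem?_eq_getElem h2]

-- the state of B's outer loop, characterised
theorem pvMerge_fold (rows : List (List String)) :
    ∀ cols : List (List Int),
      rows.foldl pvMergeCol cols =
        (List.range (max cols.length (pvMaxLen rows))).map
          (fun j => cols.getD j [] ++ pvColN rows j) := by
  induction rows with
  | nil =>
    intro cols
    simp only [List.foldl_nil, pvMaxLen, List.foldr_nil, Nat.max_zero, pvColN_nil,
      List.append_nil]
    exact (pvRangeMap_getD cols []).symm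
  | cons r rs ih =>
    intro cols
    simp only [List.foldl_cons]
    rw [ih (pvMergeCol cols r)]
    have hlen : (pvMergeCol cols r).length = max cols.length r.length :=
      pvMergeCol_length r cols
    have hmax : max (pvMergeCol cols r).length (pvMaxLen rs)
        = max cols.length (pvMaxLen (r :: rs)) := by
      rw [hlen]; simp only [pvMaxLen, List.foldr_cons]; omega
    rw [hmax]
    apply List.map_congr_left
    intro j _
    rw [pvMergeCol_getD r cols j, pvColN_cons, List.append_assoc]

theorem pvB_core (rows : List (List String)) :
    rows.foldl pvMergeCol [] = (List.range (pvMaxLen rows)).map (pvColN rows) := by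
  rw [pvMerge_fold rows []]
  simp

-- A's inner loop computes pvColN
theorem pvA_col (rows : List (List String)) (j : Nat) :
    ∀ acc : List Int,
      rows.foldl
        (fun column row =>
          if (j : Int) < (row.length : Int) then
            column ++ [pvVal ((PySem.List.pyGet? row (j : Int)).getD "")]
          else column) acc = acc ++ pvColN rows j := by
  induction rows with
  | nil => intro acc; simp [pvColN]
  | cons r rs ih =>
    intro acc
    simp only [List.foldl_cons]
    rw [ih]
    rw [pvColN_cons]
    by_cases h : j < r.length
    · have h1 : r[j]? = some r[j] := List.getElem?_eq_getElem h
      simp [h]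
    · have h1 : r[j]? = none := List.getElem?_eq_none (by omega)
      have h2 : ¬ ((j : Int) < (r.length : Int)) := by omega
      simp [h2, h1]

-- A's max() computation equals pvMaxLen
theorem pvFoldlMax (rs : List (List String)) :
    ∀ a : Int, 0 ≤ a →
      (rs.map (fun r => (r.length : Int))).foldl max a = max a (pvMaxLen rs : Int) := by
  induction rs with
  | nil => intro a ha; simp [pvMaxLen]; omega
  | cons r t ih =>
    intro a ha
    simp only [List.map_cons, List.foldl_cons]
    rw [ih (max a (r.length : Int)) (by positivity)]
    simp only [pvMaxLen, List.foldr_cons]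
    push_cast
    omega

theorem pvMaxCols (rows : List (List String)) :
    (PySem.List.max? (rows.map (fun row => (row.length : Int))) (fun y => y)).getD 0
      = (pvMaxLen rows : Int) := by
  cases rows with
  | nil => simp [PySem.List.max?, pvMaxLen]
  | cons r rs =>
    simp only [List.map_cons]
    rw [PySem.List.max?_id_cons]
    simp only [Option.getD_some]
    rw [pvFoldlMax rs (r.length : Int) (by positivity)]
    simp only [pvMaxLen, List.foldr_cons]
    push_cast
    omega

-- B's outer loop, with the tokens of each line factored out
theorem pvB_outer (g : Int → List String) (l : List Int) :
    ∀ init : List (List Int),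
      l.foldl (fun columns i =>
        let tokens := g i
        let mr := tokens.foldl
          (fun (st : List (List Int) × List (List Int)) t =>
            (st.1 ++ [st.2.headD [] ++ [pvVal t]], st.2.tail)) ([], columns)
        mr.1 ++ mr.2) init = (l.map g).foldl pvMergeCol init := by
  induction l with
  | nil => intro init; simp
  | cons x xs ih =>
    intro init
    simp only [List.foldl_cons, List.map_cons]
    rw [ih]
    congr 1
    simpa using pvFold_eq_merge (g x) [] init

-- the generic equality over an arbitrary rows list (A's two passes = B's merge pass)
theorem pvCore (rows : List (List String)) :
    (PySem.List.pyRange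
        ((PySem.List.max? (rows.map (fun row => (row.length : Int))) (fun y => y)).getD 0 - 1)
        (-1) (-1)).foldl
      (fun columns col_idx =>
        columns ++ [rows.foldl
          (fun column row =>
            if col_idx < (row.length : Int) then
              column ++ [pvVal ((PySem.List.pyGet? row col_idx).getD "")]
            else column) []]) []
      = (rows.foldl pvMergeCol []).reverse := by
  rw [pvB_core, pvMaxCols rows, PySem.List.foldl_append_singleton_eq_map, List.nil_append]
  have hrg : PySem.List.pyRange ((pvMaxLen rows : Int) - 1) (-1) (-1)
      = (PySem.List.pyRange 0 (pvMaxLen rows : Int) 1).reverse := by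
    rw [PySem.List.pyRange_neg_one_eq_reverse]
    norm_num
  rw [hrg, List.map_reverse]
  congr 1
  rw [PySem.List.pyRange_zero_natCast, List.map_map]
  apply List.map_congr_left
  intro j _
  simpa using pvA_col rows j []

-- the equality itself, unconditionally (both ports totalise the raising cases the same way)
theorem pvMain (lines : List String) (op : Int) :
    parse_numbers_by_column lines op = parse_numbers_by_column_alt lines op := by
  unfold parse_numbers_by_column parse_numbers_by_column_alt
  have hrows : (PySem.List.pyRange 0 op 1).foldl
      (fun rows i => rows ++ [PySem.Str.split₀ ((PySem.List.pyGet? lines i).getD "")]) []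
      = (PySem.List.pyRange 0 op 1).map
          (fun i => PySem.Str.split₀ ((PySem.List.pyGet? lines i).getD "")) := by
    rw [PySem.List.foldl_append_singleton_eq_map, List.nil_append]
  rw [hrows]
  rw [pvB_outer (fun i => PySem.Str.split₀ ((PySem.List.pyGet? lines i).getD ""))
      (PySem.List.pyRange 0 op 1) []]
  exact pvCore _

-- ===== VERDICT (by name: the statement is the Claim_ definition above) =====
theorem parse_numbers_by_column_spec : Claim_equal_parse_numbers_by_column := by
  intro lines op _ _
  unfold Spec_parse_numbers_by_column
  exact pvMain lines op

theorem parse_numbers_by_column_raises : Claim_raises_parse_numbers_by_column := by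
  unfold Claim_raises_parse_numbers_by_column
  refine ⟨?_, by decide⟩
  intro lines op _ hr hpre
  unfold Raises_parse_numbers_by_column at hr
  unfold Pre_parse_numbers_by_column at hpre
  omega

-- self-check: the raise witness indeed lies outside Pre_ (via the first half of the raises claim)
theorem pvRaiseWitnessOutsidePre_ok :
    ¬ Pre_parse_numbers_by_column pvRaiseWitness_parse_numbers_by_column.1
        pvRaiseWitness_parse_numbers_by_column.2 := by
  have h := parse_numbers_by_column_raises
  unfold Claim_raises_parse_numbers_by_column at h
  exact h.1 _ _ h.2.1 h.2.2.1
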